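-- pv_equiv track=rewrite | github.com/jeonhaelee/2022_programmers_python | prac80.py | before_check
-- ===== SOURCE A (Python) =====
-- def before_check(s):
--     word_li = [[0, 0], [0, 0], [0, 0]]
--
--     for w in s:
--         if w == "[":
--             word_li[0][0] += 1
--         elif w == "]":
--             word_li[0][1] += 1
--         elif w == "(":
--             word_li[1][0] += 1
--         elif w == ")":
--             word_li[1][1] += 1
--         elif w == "{":
--             word_li[2][0] += 1
--         elif w == "}":
--             word_li[2][1] += 1
--
--     for word in word_li:
--         if word[0] != word[1]:
--             return False
--
--     return True
-- ===== SOURCE B (Python) =====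
-- def before_check(s):
--     # Counts of each bracket type match iff the multiset of bracket characters
--     # is invariant under swapping each opener with its closer: test that by
--     # sorting the brackets and their swapped images and comparing.
--     pairs = {"[": "]", "]": "[", "(": ")", ")": "(", "{": "}", "}": "{"}
--     brackets = [c for c in s if c in pairs]
--     return sorted(brackets) == sorted(pairs[c] for c in brackets)
-- ===== Notes on version B (the rewrite author's own statement) =====
-- stated objective: alternative
-- what changed: Instead of tallying six counters in one branching Python-level loop and comparing them, B filters out the bracket characters and checks that their multiset is invariant under the opener/closer swap map by comparing sorted(brackets) with sorted(swapped brackets); the filter/sort work runs in C, which a timing run measured ~3x faster despite the O(n log n) sort.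
import Mathlib
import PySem

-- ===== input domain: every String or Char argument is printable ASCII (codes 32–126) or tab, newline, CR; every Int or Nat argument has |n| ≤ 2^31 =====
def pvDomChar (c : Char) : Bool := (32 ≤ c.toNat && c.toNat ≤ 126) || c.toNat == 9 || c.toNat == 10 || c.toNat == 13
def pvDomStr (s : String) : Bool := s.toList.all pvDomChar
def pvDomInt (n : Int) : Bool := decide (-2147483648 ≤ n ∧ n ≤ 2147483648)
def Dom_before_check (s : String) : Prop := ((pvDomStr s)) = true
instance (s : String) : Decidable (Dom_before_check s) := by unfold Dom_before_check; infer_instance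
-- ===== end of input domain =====

-- B replaces A's six-counter tally loop by a sort-and-compare test: the bracket
-- multiset must be invariant under the opener/closer swap (objective: alternative).

-- ===== PORT A =====
-- word_li = [[0,0],[0,0],[0,0]] ported as three Int pairs; the final loop with early return kept as the if-chain.
def before_check (s : String) : Bool :=
  let word_li := s.toList.foldl
    (fun (w : (Int × Int) × (Int × Int) × (Int × Int)) ch =>
      if ch == '[' then ((w.1.1 + 1, w.1.2), w.2)
      else if ch == ']' then ((w.1.1, w.1.2 + 1), w.2)
      else if ch == '(' then (w.1, (w.2.1.1 + 1, w.2.1.2), w.2.2)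
      else if ch == ')' then (w.1, (w.2.1.1, w.2.1.2 + 1), w.2.2)
      else if ch == '{' then (w.1, w.2.1, (w.2.2.1 + 1, w.2.2.2))
      else if ch == '}' then (w.1, w.2.1, (w.2.2.1, w.2.2.2 + 1))
      else w)
    ((0, 0), (0, 0), (0, 0))
  if word_li.1.1 ≠ word_li.1.2 then false
  else if word_li.2.1.1 ≠ word_li.2.1.2 then false
  else if word_li.2.2.1 ≠ word_li.2.2.2 then false
  else true

-- ===== PORT B =====
def bcPairs : PySem.Dict Char Char :=
  PySem.Dict.ofList [('[', ']'), (']', '['), ('(', ')'), (')', '('), ('{', '}'), ('}', '{')]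

-- pairs[c] is total here because brackets holds dict keys only; ported as getD with the key itself as default.
def before_check_alt (s : String) : Bool :=
  let brackets := s.toList.filter (fun c => PySem.Dict.contains bcPairs c)
  PySem.List.sorted brackets (fun x => x) false
    == PySem.List.sorted (brackets.map (fun c => PySem.Dict.getD bcPairs c c)) (fun x => x) false

-- ===== PRECONDITION & SPEC =====
def Spec_before_check (s : String) (out : Bool) : Prop := out = before_check_alt s
instance (s : String) (out : Bool) : Decidable (Spec_before_check s out) := by unfold Spec_before_check; infer_instance

-- ===== CLAIM (what is proved, stated in full; the proofs are below) =====
def Claim_equal_before_check : Prop := ∀ (s : String), Dom_before_check s → Spec_before_check s (before_check s)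

-- ===== LEMMAS AND PROOFS =====

def bcItems : List (Char × Char) := [('[', ']'), (']', '['), ('(', ')'), (')', '('), ('{', '}'), ('}', '{')]

theorem bc_eq_mk : bcPairs = PySem.Dict.mk bcItems := by decide

-- B's swap map fixes every non-bracket character
theorem bc_getD_of_not_key (c : Char) (h1 : c ≠ '[') (h2 : c ≠ ']') (h3 : c ≠ '(')
    (h4 : c ≠ ')') (h5 : c ≠ '{') (h6 : c ≠ '}') :
    PySem.Dict.getD bcPairs c c = c := by
  have e1 : ('[' == c) = false := by simp [Ne.symm h1]
  have e2 : (']' == c) = false := by simp [Ne.symm h2]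
  have e3 : ('(' == c) = false := by simp [Ne.symm h3]
  have e4 : (')' == c) = false := by simp [Ne.symm h4]
  have e5 : ('{' == c) = false := by simp [Ne.symm h5]
  have e6 : ('}' == c) = false := by simp [Ne.symm h6]
  simp [bc_eq_mk, bcItems, PySem.Dict.getD, PySem.Dict.get?, List.find?, e1, e2, e3, e4, e5, e6]

-- B's swap map is an involution, hence injective
theorem bc_swap_involutive : Function.Involutive (fun c => PySem.Dict.getD bcPairs c c) := by
  intro c
  by_cases h1 : c = '[';  · subst h1; decide
  by_cases h2 : c = ']';  · subst h2; decide
  by_cases h3 : c = '(';  · subst h3; decide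
  by_cases h4 : c = ')';  · subst h4; decide
  by_cases h5 : c = '{';  · subst h5; decide
  by_cases h6 : c = '}';  · subst h6; decide
  simp only [bc_getD_of_not_key c h1 h2 h3 h4 h5 h6]

-- counting a character in the swapped list counts its partner in the original
theorem count_map_swap (l : List Char) (a : Char) :
    List.count a (l.map (fun c => PySem.Dict.getD bcPairs c c))
      = List.count (PySem.Dict.getD bcPairs a a) l := by
  conv_lhs => rw [← bc_swap_involutive a]
  exact List.count_map_of_injective l _ bc_swap_involutive.injective _

-- A's fold adds the six per-character counts onto the initial accumulator
theorem foldA_eq (cs : List Char) (w : (Int × Int) × (Int × Int) × (Int × Int)) :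
    cs.foldl
      (fun (w : (Int × Int) × (Int × Int) × (Int × Int)) ch =>
        if ch == '[' then ((w.1.1 + 1, w.1.2), w.2)
        else if ch == ']' then ((w.1.1, w.1.2 + 1), w.2)
        else if ch == '(' then (w.1, (w.2.1.1 + 1, w.2.1.2), w.2.2)
        else if ch == ')' then (w.1, (w.2.1.1, w.2.1.2 + 1), w.2.2)
        else if ch == '{' then (w.1, w.2.1, (w.2.2.1 + 1, w.2.2.2))
        else if ch == '}' then (w.1, w.2.1, (w.2.2.1, w.2.2.2 + 1))
        else w) w
    = ((w.1.1 + cs.count '[', w.1.2 + cs.count ']'),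
       (w.2.1.1 + cs.count '(', w.2.1.2 + cs.count ')'),
       (w.2.2.1 + cs.count '{', w.2.2.2 + cs.count '}')) := by
  induction cs generalizing w with
  | nil => simp
  | cons x xs ih =>
    simp only [List.foldl_cons]
    rw [ih]
    by_cases h1 : x = '[' <;> by_cases h2 : x = ']' <;> by_cases h3 : x = '(' <;>
      by_cases h4 : x = ')' <;> by_cases h5 : x = '{' <;> by_cases h6 : x = '}' <;>
      simp [h1, h2, h3, h4, h5, h6, Prod.ext_iff] <;> omega

-- A returns true iff the three bracket counts match
theorem A_iff (s : String) :
    before_check s = true ↔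
      (s.toList.count '[' = s.toList.count ']' ∧
       s.toList.count '(' = s.toList.count ')' ∧
       s.toList.count '{' = s.toList.count '}') := by
  unfold before_check
  rw [foldA_eq]
  simp only [Int.zero_add]
  by_cases e1 : (s.toList.count '[' : Int) = s.toList.count ']' <;>
    by_cases e2 : (s.toList.count '(' : Int) = s.toList.count ')' <;>
    by_cases e3 : (s.toList.count '{' : Int) = s.toList.count '}' <;>
    simp_all [Nat.cast_inj]

-- B returns true iff the three bracket counts match
theorem B_iff (s : String) :
    before_check_alt s = true ↔
      (s.toList.count '[' = s.toList.count ']' ∧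
       s.toList.count '(' = s.toList.count ')' ∧
       s.toList.count '{' = s.toList.count '}') := by
  simp only [before_check_alt, beq_iff_eq, PySem.List.sorted_id_eq_sorted_id_iff_perm,
    List.perm_iff_count]
  constructor
  · intro h
    refine ⟨?_, ?_, ?_⟩
    · have t := h '['
      rw [count_map_swap, show PySem.Dict.getD bcPairs '[' '[' = ']' from by decide,
        List.count_filter (by decide), List.count_filter (by decide)] at t
      exact t
    · have t := h '('
      rw [count_map_swap, show PySem.Dict.getD bcPairs '(' '(' = ')' from by decide,
        List.count_filter (by decide), List.count_filter (by decide)] at t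
      exact t
    · have t := h '{'
      rw [count_map_swap, show PySem.Dict.getD bcPairs '{' '{' = '}' from by decide,
        List.count_filter (by decide), List.count_filter (by decide)] at t
      exact t
  · rintro ⟨h1, h2, h3⟩ a
    rw [count_map_swap]
    by_cases g1 : a = '['
    · subst g1
      rw [show PySem.Dict.getD bcPairs '[' '[' = ']' from by decide,
        List.count_filter (by decide), List.count_filter (by decide)]
      exact h1
    by_cases g2 : a = ']'
    · subst g2
      rw [show PySem.Dict.getD bcPairs ']' ']' = '[' from by decide,
        List.count_filter (by decide), List.count_filter (by decide)]
      exact h1.symm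
    by_cases g3 : a = '('
    · subst g3
      rw [show PySem.Dict.getD bcPairs '(' '(' = ')' from by decide,
        List.count_filter (by decide), List.count_filter (by decide)]
      exact h2
    by_cases g4 : a = ')'
    · subst g4
      rw [show PySem.Dict.getD bcPairs ')' ')' = '(' from by decide,
        List.count_filter (by decide), List.count_filter (by decide)]
      exact h2.symm
    by_cases g5 : a = '{'
    · subst g5
      rw [show PySem.Dict.getD bcPairs '{' '{' = '}' from by decide,
        List.count_filter (by decide), List.count_filter (by decide)]
      exact h3
    by_cases g6 : a = '}'
    · subst g6
      rw [show PySem.Dict.getD bcPairs '}' '}' = '{' from by decide,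
        List.count_filter (by decide), List.count_filter (by decide)]
      exact h3.symm
    rw [bc_getD_of_not_key a g1 g2 g3 g4 g5 g6]

-- ===== VERDICT (by name: the statement is the Claim_ definition above) =====
theorem before_check_spec : Claim_equal_before_check := by
  intro s _
  unfold Spec_before_check
  have h := (A_iff s).trans (B_iff s).symm
  cases hA : before_check s <;> cases hB : before_check_alt s <;> simp_all
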